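-- pv_equiv track=rewrite | github.com/RyanCheng98153/data-mining | hw1/train_model.py | detect_pm25_name
-- ===== SOURCE A (Python) =====
-- def detect_pm25_name(feature_items):
--     # try to find 'PM2.5' ignoring spaces/dots/case
--     for it in feature_items:
--         if it.strip().upper().replace('.', '').replace(' ', '') == 'PM25':
--             return it
--     for it in feature_items:
--         if 'PM' in it.upper():
--             return it
--     raise ValueError("No PM2.5-like feature found")
-- ===== SOURCE B (Python) =====
-- def detect_pm25_name(feature_items):
--     # classify each item with a rank (0 = exact normalized 'PM25', 1 = contains
--     # 'PM', 2 = neither) and pick the first item of minimal rank via min();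
--     # Python's min returns the first extremal element, preserving A's priority.
--     def _rank(it):
--         if it.strip().upper().replace('.', '').replace(' ', '') == 'PM25':
--             return 0
--         if 'PM' in it.upper():
--             return 1
--         return 2
--     if not feature_items:
--         raise ValueError("No PM2.5-like feature found")
--     best = min(feature_items, key=_rank)
--     if _rank(best) == 2:
--         raise ValueError("No PM2.5-like feature found")
--     return best
-- ===== Notes on version B (the rewrite author's own statement) =====
-- stated objective: idiomatic
-- what changed: Replaces A's two sequential scans with a rank function (0 exact, 1 'PM'-containing, 2 neither) and a single min(feature_items, key=rank) selection, relying on min returning the first extremal element.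
import Mathlib
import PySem

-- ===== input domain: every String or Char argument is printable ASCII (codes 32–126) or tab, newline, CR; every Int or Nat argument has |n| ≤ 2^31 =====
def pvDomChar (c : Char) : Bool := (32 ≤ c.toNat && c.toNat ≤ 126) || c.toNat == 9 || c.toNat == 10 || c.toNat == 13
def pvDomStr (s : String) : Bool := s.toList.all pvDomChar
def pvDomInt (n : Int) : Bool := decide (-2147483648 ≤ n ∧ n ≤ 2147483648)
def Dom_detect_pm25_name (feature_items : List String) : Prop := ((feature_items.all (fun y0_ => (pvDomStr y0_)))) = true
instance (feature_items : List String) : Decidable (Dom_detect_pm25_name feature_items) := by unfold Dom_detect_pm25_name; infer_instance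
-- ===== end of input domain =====

-- B replaces A's two sequential scans by a rank function and one min-by-key selection; objective: idiomatic.

-- it.strip().upper().replace('.', '').replace(' ', '')  (shared normalization helper)
def pmNorm (it : String) : String :=
  PySem.Str.replace (PySem.Str.replace (PySem.Str.upper (PySem.Str.strip it)) "." "") " " ""

-- ===== PORT A =====
-- first loop of A: first item whose normal form is 'PM25'
def pmPassExact : List String → Option String
  | [] => none
  | it :: rest => if pmNorm it == "PM25" then some it else pmPassExact rest

-- second loop of A: first item with 'PM' in it.upper()
def pmPassLoose : List String → Option String
  | [] => none
  | it :: rest => if PySem.Str.isIn "PM" (PySem.Str.upper it) then some it else pmPassLoose rest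

def detect_pm25_name (feature_items : List String) : String :=
  match pmPassExact feature_items with
  | some it => it
  | none =>
    match pmPassLoose feature_items with
    | some it => it
    | none => ""   -- Python raises ValueError here; excluded by Pre_

-- ===== PORT B =====
-- _rank: 0 = exact normalized 'PM25', 1 = contains 'PM', 2 = neither
def pmRank (it : String) : Nat :=
  if pmNorm it == "PM25" then 0
  else if PySem.Str.isIn "PM" (PySem.Str.upper it) then 1
  else 2

def detect_pm25_name_alt (feature_items : List String) : String :=
  match PySem.List.min? feature_items pmRank with
  | none => ""   -- empty list: Python raises ValueError; excluded by Pre_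
  | some best => if pmRank best == 2 then "" else best
     -- pmRank best == 2: Python raises ValueError; excluded by Pre_

-- ===== PRECONDITION & SPEC =====
-- A raises ValueError when no item matches either test; Pre_ excludes exactly those inputs.
def Pre_detect_pm25_name (feature_items : List String) : Prop :=
  (feature_items.any (fun it =>
    pmNorm it == "PM25" || PySem.Str.isIn "PM" (PySem.Str.upper it))) = true
instance (feature_items : List String) : Decidable (Pre_detect_pm25_name feature_items) := by
  unfold Pre_detect_pm25_name; infer_instance
def pvWitness_detect_pm25_name : List String := ["temp", "pm 2.5"]

def Spec_detect_pm25_name (feature_items : List String) (out : String) : Prop := out = detect_pm25_name_alt feature_items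
instance (feature_items : List String) (out : String) : Decidable (Spec_detect_pm25_name feature_items out) := by unfold Spec_detect_pm25_name; infer_instance

-- ===== CLAIM (what is proved, stated in full; the proofs are below) =====
def Claim_equal_detect_pm25_name : Prop := ∀ (feature_items : List String), Dom_detect_pm25_name feature_items → Pre_detect_pm25_name feature_items → Spec_detect_pm25_name feature_items (detect_pm25_name feature_items)

-- ===== LEMMAS AND PROOFS =====

-- 'PM' in it.upper(), in simp normal form
def pmLooseB (it : String) : Bool := PySem.Chars.isIn ['P', 'M'] (PySem.Chars.upper it.toList)

theorem pmRank_eq0 (it : String) (h1 : (pmNorm it == "PM25") = true) : pmRank it = 0 := by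
  simp [pmRank, h1]

theorem pmRank_eq1 (it : String) (h1 : (pmNorm it == "PM25") = false)
    (h2 : pmLooseB it = true) : pmRank it = 1 := by
  simp only [pmLooseB] at h2
  unfold pmRank
  simp [h1, PySem.Str.isIn, PySem.Str.upper] at h2 ⊢
  simp_all

theorem pmRank_eq2 (it : String) (h1 : (pmNorm it == "PM25") = false)
    (h2 : pmLooseB it = false) : pmRank it = 2 := by
  simp only [pmLooseB] at h2
  unfold pmRank
  simp [h1, PySem.Str.isIn, PySem.Str.upper] at h2 ⊢
  simp_all

theorem pmRank_zero (it : String) (h : pmRank it = 0) : (pmNorm it == "PM25") = true := by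
  by_contra hc
  simp only [Bool.not_eq_true] at hc
  cases h2 : pmLooseB it
  · rw [pmRank_eq2 it hc h2] at h; omega
  · rw [pmRank_eq1 it hc h2] at h; omega

theorem pmRank_one (it : String) (h : pmRank it = 1) :
    (pmNorm it == "PM25") = false ∧ pmLooseB it = true := by
  cases h1 : (pmNorm it == "PM25")
  · cases h2 : pmLooseB it
    · rw [pmRank_eq2 it h1 h2] at h; omega
    · exact ⟨rfl, rfl⟩
  · rw [pmRank_eq0 it h1] at h; omega

theorem pmRank_two (it : String) (h : pmRank it = 2) :
    (pmNorm it == "PM25") = false ∧ pmLooseB it = false := by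
  cases h1 : (pmNorm it == "PM25")
  · cases h2 : pmLooseB it
    · exact ⟨rfl, rfl⟩
    · rw [pmRank_eq1 it h1 h2] at h; omega
  · rw [pmRank_eq0 it h1] at h; omega

-- first item of rank exactly 1 (helper for characterizing min?'s fold)
def pmPassR1 : List String → Option String
  | [] => none
  | it :: rest => if pmRank it == 1 then some it else pmPassR1 rest

-- the fold step inside PySem.List.min? with key pmRank
def pmStep (acc : Option String) (x : String) : Option String :=
  match acc with
  | none => some x
  | some m => if pmRank x < pmRank m then some x else some m

theorem min?_eq_foldl (xs : List String) :
    PySem.List.min? xs pmRank = xs.foldl pmStep none := by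
  unfold PySem.List.min?
  congr 1
  funext acc x
  cases acc <;> rfl

theorem pmRank_cases (it : String) : pmRank it = 0 ∨ pmRank it = 1 ∨ pmRank it = 2 := by
  unfold pmRank; split_ifs <;> simp

theorem foldl_rank0 (xs : List String) (m : String) (hm : pmRank m = 0) :
    xs.foldl pmStep (some m) = some m := by
  induction xs with
  | nil => rfl
  | cons it rest ih => simp [List.foldl, pmStep, hm, ih]

theorem foldl_rank1 (xs : List String) (m : String) (hm : pmRank m = 1) :
    xs.foldl pmStep (some m) = some ((pmPassExact xs).getD m) := by
  induction xs generalizing m with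
  | nil => rfl
  | cons it rest ih =>
    rw [List.foldl_cons]
    rcases pmRank_cases it with h | h | h
    · have hstep : pmStep (some m) it = some it := by
        simp [pmStep, hm, h]
      have h1 := pmRank_zero it h
      rw [hstep, foldl_rank0 rest it h]
      simp [pmPassExact, h1]
    · have hstep : pmStep (some m) it = some m := by
        simp [pmStep, hm, h]
      have h1 := (pmRank_one it h).1
      rw [hstep, ih m hm]
      simp [pmPassExact, h1]
    · have hstep : pmStep (some m) it = some m := by
        simp [pmStep, hm, h]
      have h1 := (pmRank_two it h).1
      rw [hstep, ih m hm]
      simp [pmPassExact, h1]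

theorem foldl_rank2 (xs : List String) (m : String) (hm : pmRank m = 2) :
    xs.foldl pmStep (some m) = some (((pmPassExact xs).or (pmPassR1 xs)).getD m) := by
  induction xs generalizing m with
  | nil => rfl
  | cons it rest ih =>
    rw [List.foldl_cons]
    rcases pmRank_cases it with h | h | h
    · have hstep : pmStep (some m) it = some it := by
        simp [pmStep, hm, h]
      have h1 := pmRank_zero it h
      rw [hstep, foldl_rank0 rest it h]
      simp [pmPassExact, h1]
    · have hstep : pmStep (some m) it = some it := by
        simp [pmStep, hm, h]
      have h1 := (pmRank_one it h).1
      rw [hstep, foldl_rank1 rest it h]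
      simp only [pmPassExact, pmPassR1, h1, h]
      cases pmPassExact rest <;> simp [Option.or]
    · have hstep : pmStep (some m) it = some m := by
        simp [pmStep, hm, h]
      have h1 := (pmRank_two it h).1
      rw [hstep, ih m hm]
      have hne : (pmRank it == 1) = false := by simp [h]
      simp [pmPassExact, pmPassR1, h1, hne]

theorem passExact_rank (xs : List String) (a : String) (h : pmPassExact xs = some a) :
    pmRank a = 0 := by
  induction xs with
  | nil => simp [pmPassExact] at h
  | cons it rest ih =>
    by_cases h1 : (pmNorm it == "PM25") = true
    · simp [pmPassExact, h1] at h; subst h; exact pmRank_eq0 it h1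
    · simp [pmPassExact, h1] at h; exact ih h

theorem passR1_rank (xs : List String) (a : String) (h : pmPassR1 xs = some a) :
    pmRank a = 1 := by
  induction xs with
  | nil => simp [pmPassR1] at h
  | cons it rest ih =>
    by_cases h1 : (pmRank it == 1) = true
    · simp [pmPassR1, h1] at h; subst h; simpa using h1
    · simp [pmPassR1, h1] at h; exact ih h

-- when no exact item exists, A's loose pass and the rank-1 pass coincide
theorem loose_eq_r1 (xs : List String) (h : pmPassExact xs = none) :
    pmPassLoose xs = pmPassR1 xs := by
  induction xs with
  | nil => rfl
  | cons it rest ih =>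
    by_cases h1 : (pmNorm it == "PM25") = true
    · simp [pmPassExact, h1] at h
    · simp only [pmPassExact] at h
      rw [if_neg (by simp_all)] at h
      have h1' : (pmNorm it == "PM25") = false := by simp_all
      have hL : pmPassLoose (it :: rest) = if pmLooseB it = true then some it else pmPassLoose rest := by
        simp [pmPassLoose, pmLooseB]
      rw [hL]
      cases h2 : pmLooseB it
      · have hr : (pmRank it == 1) = false := by
          simp [pmRank_eq2 it h1' h2]
        simp [pmPassR1, hr, ih h]
      · have hr : (pmRank it == 1) = true := by
          have := pmRank_eq1 it h1' h2; simp [this]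
        simp [pmPassR1, hr]

theorem pre_not_none (xs : List String) (hp : Pre_detect_pm25_name xs)
    (hE : pmPassExact xs = none) : pmPassLoose xs ≠ none := by
  induction xs with
  | nil => simp [Pre_detect_pm25_name] at hp
  | cons it rest ih =>
    by_cases h1 : (pmNorm it == "PM25") = true
    · simp [pmPassExact, h1] at hE
    · simp only [pmPassExact] at hE
      rw [if_neg (by simp_all)] at hE
      have hL : pmPassLoose (it :: rest) = if pmLooseB it = true then some it else pmPassLoose rest := by
        simp [pmPassLoose, pmLooseB]
      rw [hL]
      cases h2 : pmLooseB it
      · have hp' : Pre_detect_pm25_name rest := by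
          simp only [Pre_detect_pm25_name, List.any_cons] at hp
          simp only [pmLooseB] at h2
          simp [h1, PySem.Str.isIn, PySem.Str.upper, h2] at hp
          simp [Pre_detect_pm25_name]
          simp_all
        simp [ih hp' hE]
      · simp

-- ===== VERDICT (by name: the statement is the Claim_ definition above) =====
theorem detect_pm25_name_spec : Claim_equal_detect_pm25_name := by
  intro xs _ hp
  unfold Spec_detect_pm25_name detect_pm25_name detect_pm25_name_alt
  rw [min?_eq_foldl]
  cases xs with
  | nil => simp [Pre_detect_pm25_name] at hp
  | cons x t =>
    have step1 : (x :: t).foldl pmStep none = t.foldl pmStep (some x) := by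
      simp [List.foldl, pmStep]
    rw [step1]
    rcases pmRank_cases x with h | h | h
    · -- x is exact: A's first pass picks x, B's min keeps x
      have h1 := pmRank_zero x h
      rw [foldl_rank0 t x h]
      simp [pmPassExact, h1, h]
    · obtain ⟨h1, h2⟩ := pmRank_one x h
      rw [foldl_rank1 t x h]
      cases hE : pmPassExact t with
      | some a =>
        have ha := passExact_rank t a hE
        simp [pmPassExact, h1, hE, ha]
      | none =>
        have hEx : pmPassExact (x :: t) = none := by simp [pmPassExact, h1, hE]
        have hL : pmPassLoose (x :: t) = pmPassR1 (x :: t) := loose_eq_r1 _ hEx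
        have hR1 : pmPassR1 (x :: t) = some x := by
          simp [pmPassR1, h]
        simp [hEx, hL, hR1, h]
    · obtain ⟨h1, h2⟩ := pmRank_two x h
      rw [foldl_rank2 t x h]
      cases hE : pmPassExact t with
      | some a =>
        have ha := passExact_rank t a hE
        simp [pmPassExact, h1, hE, ha, Option.or]
      | none =>
        have hEx : pmPassExact (x :: t) = none := by simp [pmPassExact, h1, hE]
        have hL : pmPassLoose (x :: t) = pmPassR1 (x :: t) := loose_eq_r1 _ hEx
        have hR1x : pmPassR1 (x :: t) = pmPassR1 t := by
          have hr : (pmRank x == 1) = false := by simp [h]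
          simp [pmPassR1, hr]
        cases hR : pmPassR1 t with
        | some b =>
          have hb := passR1_rank t b hR
          simp [hEx, hL, hR1x, hR, Option.or, hb]
        | none =>
          exfalso
          exact pre_not_none _ hp hEx (by rw [hL, hR1x, hR])
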